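-- pv_equiv track=rewrite | github.com/sandramilenas/proyecto_5 | proyecto_4_1.py | convertir_mapa_a_matriz
-- ===== SOURCE A (Python) =====
-- def convertir_mapa_a_matriz(mapa):
--   filas = mapa.split("\n")
--   columnas = len(filas[0])
--   matriz = []
--   for fila in filas:
--     matriz.append(list(fila))
--
--   for i in range(len(matriz)):
--     for j in range(len(matriz[0])):
--       if i == 0 or j == 0 or i == len(matriz) - 1 or j == len(matriz[0]) - 1:
--         matriz[i][j] = "#"
--
--   return matriz
-- ===== SOURCE B (Python) =====
-- def convertir_mapa_a_matriz(mapa):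
--   matriz = [list(f) for f in mapa.split("\n")]
--   columnas = len(matriz[0])
--   if columnas == 0:
--     return matriz
--   n = len(matriz)
--   for j in range(columnas):
--     matriz[0][j] = "#"
--     matriz[n - 1][j] = "#"
--   for i in range(n):
--     matriz[i][0] = "#"
--     matriz[i][columnas - 1] = "#"
--   return matriz
-- ===== Notes on version B (the rewrite author's own statement) =====
-- stated objective: alternative
-- what changed: B builds the matrix with a comprehension and fills only the border cells in two edge passes (top/bottom rows, then left/right columns) instead of A's full nested scan over every cell with an i/j border test.
import Mathlib
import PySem

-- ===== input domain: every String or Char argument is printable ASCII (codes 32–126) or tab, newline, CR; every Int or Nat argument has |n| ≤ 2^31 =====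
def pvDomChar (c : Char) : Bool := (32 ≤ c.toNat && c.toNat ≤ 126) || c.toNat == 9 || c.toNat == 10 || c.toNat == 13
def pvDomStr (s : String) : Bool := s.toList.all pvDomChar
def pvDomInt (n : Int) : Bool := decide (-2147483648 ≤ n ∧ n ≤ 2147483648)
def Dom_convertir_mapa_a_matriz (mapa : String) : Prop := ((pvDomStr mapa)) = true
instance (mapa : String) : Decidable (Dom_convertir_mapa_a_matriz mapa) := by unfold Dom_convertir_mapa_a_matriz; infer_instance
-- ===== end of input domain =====

-- B fills only the border cells (two edge passes) instead of A's full nested scan with a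
-- border test on every cell; same return value wherever A returns (objective: alternative).

-- `matriz[i][j] = "#"`: Python's subscript assignment; in-range on every input admitted by
-- Pre_ (out of range Python raises IndexError, excluded by Pre_; Lean's set/modify are no-ops there).
def pvUpd (m : List (List String)) (i j : Nat) : List (List String) :=
  m.modify i (fun r => r.set j "#")

-- ===== PORT A =====
def convertir_mapa_a_matriz (mapa : String) : List (List String) :=
  -- filas = mapa.split("\n")  (separator ≠ "", so split? is always `some`)
  let filas := (PySem.Str.split? mapa "\n").getD []
  -- columnas = len(filas[0])  (split always returns a nonempty list, so filas[0] exists)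
  let columnas := filas.headI.toList.length
  -- matriz = []; for fila in filas: matriz.append(list(fila))
  let matriz := filas.foldl (fun acc fila => acc ++ [fila.toList.map (fun ch => String.ofList [ch])]) []
  -- nested border loop; len(matriz) and len(matriz[0]) = columnas are invariant under the
  -- point assignments (set/modify preserve lengths), so the Python's re-evaluated bounds are these constants
  (List.range matriz.length).foldl (fun m i =>
    (List.range columnas).foldl (fun m j =>
      if i = 0 ∨ j = 0 ∨ i = matriz.length - 1 ∨ j = columnas - 1 then pvUpd m i j else m) m) matriz

-- ===== PORT B =====
def convertir_mapa_a_matriz_alt (mapa : String) : List (List String) :=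
  -- matriz = [list(f) for f in mapa.split("\n")]
  let matriz := ((PySem.Str.split? mapa "\n").getD []).map (fun f => f.toList.map (fun ch => String.ofList [ch]))
  let columnas := (((PySem.Str.split? mapa "\n").getD []).headI).toList.length
  if columnas = 0 then matriz else
  let n := matriz.length
  -- top and bottom rows
  let m1 := (List.range columnas).foldl (fun m j => pvUpd (pvUpd m 0 j) (n - 1) j) matriz
  -- left and right columns
  (List.range n).foldl (fun m i => pvUpd (pvUpd m i 0) i (columnas - 1)) m1

-- ===== PRECONDITION & SPEC =====
-- Pre_ excludes exactly the jagged maps on which A raises IndexError: some row shorter than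
-- row 0 while row 0 is nonempty (the border assignment indexes every row at len(row 0) - 1).
def Pre_convertir_mapa_a_matriz (mapa : String) : Prop :=
  let filas := (PySem.Str.split? mapa "\n").getD []
  filas.headI.toList.length = 0 ∨ ∀ f ∈ filas, filas.headI.toList.length ≤ f.toList.length
instance (mapa : String) : Decidable (Pre_convertir_mapa_a_matriz mapa) := by
  unfold Pre_convertir_mapa_a_matriz; infer_instance

def pvWitness_convertir_mapa_a_matriz : String := "ab\ncd"

def Spec_convertir_mapa_a_matriz (mapa : String) (out : List (List String)) : Prop := out = convertir_mapa_a_matriz_alt mapa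
instance (mapa : String) (out : List (List String)) : Decidable (Spec_convertir_mapa_a_matriz mapa out) := by unfold Spec_convertir_mapa_a_matriz; infer_instance

-- ===== CLAIM (what is proved, stated in full; the proofs are below) =====
def Claim_equal_convertir_mapa_a_matriz : Prop := ∀ (mapa : String), Dom_convertir_mapa_a_matriz mapa → Pre_convertir_mapa_a_matriz mapa → Spec_convertir_mapa_a_matriz mapa (convertir_mapa_a_matriz mapa)

-- ===== LEMMAS AND PROOFS =====

-- the cell of m at row i, column j (none if out of range)
def pvCell (m : List (List String)) (i j : Nat) : Option String :=
  m[i]?.bind (fun r => r[j]?)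

theorem pvCell_upd (m : List (List String)) (i j i' j' : Nat) :
    pvCell (pvUpd m i j) i' j' =
      if i' = i ∧ j' = j then (pvCell m i' j').map (fun _ => "#") else pvCell m i' j' := by
  unfold pvCell pvUpd
  rw [List.getElem?_modify]
  rcases h : m[i']? with _ | r
  · simp
  · simp only [Option.bind_some]
    by_cases hi : i' = i
    · subst hi
      by_cases hj : j' = j
      · subst hj
        rcases hr : r[j']? with _ | x
        · simp [List.getElem?_set, List.getElem?_eq_none_iff.mp hr, hr]
        · have hlt : j' < r.length := List.getElem?_eq_some_iff.mp hr |>.1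
          simp [List.getElem?_set_self hlt, hr]
      · simp [List.getElem?_set_ne (Ne.symm hj), hj]
    · simp [Ne.symm hi, hi]

def pvShape (m : List (List String)) : List Nat := m.map List.length

theorem pvShape_upd (m : List (List String)) (i j : Nat) : pvShape (pvUpd m i j) = pvShape m := by
  unfold pvShape pvUpd
  induction m generalizing i with
  | nil => cases i <;> rfl
  | cons r l ih =>
    cases i with
    | zero => simp [List.modify]
    | succ k => simpa using ih k

theorem pvShape_foldl {α : Type} (f : List (List String) → α → List (List String))
    (h : ∀ m x, pvShape (f m x) = pvShape m) (L : List α) (m : List (List String)) :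
    pvShape (L.foldl f m) = pvShape m := by
  induction L generalizing m with
  | nil => rfl
  | cons a l ih => simp [List.foldl_cons, ih, h]

theorem pvEq_of_shape_cell (m m' : List (List String)) (h1 : pvShape m = pvShape m')
    (h2 : ∀ i j, pvCell m i j = pvCell m' i j) : m = m' := by
  have hlen : m.length = m'.length := by
    have := congrArg List.length h1; simpa [pvShape] using this
  apply List.ext_getElem?
  intro i
  rcases h : m[i]? with _ | r
  · rw [List.getElem?_eq_none_iff] at h
    exact (List.getElem?_eq_none_iff.mpr (by omega)).symm
  · have hi : i < m.length := (List.getElem?_eq_some_iff.mp h).1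
    rcases h' : m'[i]? with _ | r'
    · rw [List.getElem?_eq_none_iff] at h'; omega
    · have hrl : r.length = r'.length := by
        have := congrArg (fun L => L[i]?) h1
        simpa [pvShape, h, h'] using this
      have : r = r' := by
        apply List.ext_getElem?
        intro j
        have := h2 i j
        simpa [pvCell, h, h'] using this
      rw [this]

theorem pvCell_foldl_range (f : List (List String) → Nat → List (List String))
    (P : Nat → Nat → Nat → Bool)
    (hf : ∀ m k i j, pvCell (f m k) i j =
      if P k i j then (pvCell m i j).map (fun _ => "#") else pvCell m i j)
    (n : Nat) (m : List (List String)) (i j : Nat) :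
    pvCell ((List.range n).foldl f m) i j =
      if (List.range n).any (fun k => P k i j) then (pvCell m i j).map (fun _ => "#")
      else pvCell m i j := by
  induction n generalizing m with
  | zero => simp
  | succ n ih =>
    rw [List.range_succ, List.foldl_append, List.any_append]
    simp only [List.foldl_cons, List.foldl_nil, List.any_cons, List.any_nil]
    rw [hf, ih]
    by_cases h1 : (List.range n).any (fun k => P k i j)
    · by_cases h2 : P n i j
      · simp only [h1, h2, Bool.true_or, if_true]
        cases pvCell m i j <;> rfl
      · simp [h1, h2]
    · simp [h1]

theorem pvFoldl_append_eq_map (filas : List String) :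
    filas.foldl (fun acc fila => acc ++ [fila.toList.map (fun ch => String.ofList [ch])]) [] =
      filas.map (fun f => f.toList.map (fun ch => String.ofList [ch])) := by
  have gen : ∀ (l : List String) (acc : List (List String)),
      l.foldl (fun acc fila => acc ++ [fila.toList.map (fun ch => String.ofList [ch])]) acc =
        acc ++ l.map (fun f => f.toList.map (fun ch => String.ofList [ch])) := by
    intro l
    induction l with
    | nil => simp
    | cons a l ih => intro acc; simp [ih]
  simpa using gen filas []

theorem pvShapeA (n c : Nat) (m0 : List (List String)) :
    pvShape ((List.range n).foldl (fun m i =>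
      (List.range c).foldl (fun m j =>
        if i = 0 ∨ j = 0 ∨ i = n - 1 ∨ j = c - 1 then pvUpd m i j else m) m) m0) = pvShape m0 :=
  pvShape_foldl _ (fun m k => pvShape_foldl _
    (fun m x => by by_cases h : k = 0 ∨ x = 0 ∨ k = n - 1 ∨ x = c - 1 <;> simp [h, pvShape_upd]) _ m) _ _

theorem pvCell_upd2col (m : List (List String)) (a b j0 i j : Nat) :
    pvCell (pvUpd (pvUpd m a j0) b j0) i j =
      if (i = a ∨ i = b) ∧ j = j0 then (pvCell m i j).map (fun _ => "#") else pvCell m i j := by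
  rw [pvCell_upd, pvCell_upd]
  rcases hX : pvCell m i j with _ | x
  · split_ifs <;> simp
  · split_ifs with h1 h2 h3 <;> simp_all

theorem pvCell_upd2row (m : List (List String)) (i0 a b i j : Nat) :
    pvCell (pvUpd (pvUpd m i0 a) i0 b) i j =
      if i = i0 ∧ (j = a ∨ j = b) then (pvCell m i j).map (fun _ => "#") else pvCell m i j := by
  rw [pvCell_upd, pvCell_upd]
  rcases hX : pvCell m i j with _ | x
  · split_ifs <;> simp
  · split_ifs with h1 h2 h3 <;> simp_all

theorem pvCellA (n c : Nat) (m0 : List (List String)) (i j : Nat) :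
    pvCell ((List.range n).foldl (fun m i =>
      (List.range c).foldl (fun m j =>
        if i = 0 ∨ j = 0 ∨ i = n - 1 ∨ j = c - 1 then pvUpd m i j else m) m) m0) i j =
    if i < n ∧ j < c ∧ (i = 0 ∨ j = 0 ∨ i = n - 1 ∨ j = c - 1) then
      (pvCell m0 i j).map (fun _ => "#") else pvCell m0 i j := by
  have hstep : ∀ (m : List (List String)) (k i j : Nat),
      pvCell ((List.range c).foldl (fun m j =>
        if k = 0 ∨ j = 0 ∨ k = n - 1 ∨ j = c - 1 then pvUpd m k j else m) m) i j =
      if decide (i = k ∧ j < c ∧ (k = 0 ∨ j = 0 ∨ k = n - 1 ∨ j = c - 1)) then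
        (pvCell m i j).map (fun _ => "#") else pvCell m i j := by
    intro m k i j
    rw [pvCell_foldl_range _
      (fun j0 i j => decide ((k = 0 ∨ j0 = 0 ∨ k = n - 1 ∨ j0 = c - 1) ∧ i = k ∧ j = j0))
      (by
        intro m j0 i j
        by_cases hc : k = 0 ∨ j0 = 0 ∨ k = n - 1 ∨ j0 = c - 1
        · rw [if_pos hc, pvCell_upd]
          by_cases hij : i = k ∧ j = j0
          · simp [hc, hij]
          · simp [hc, hij]
        · rw [if_neg hc]
          simp [hc]) c m i j]
    refine if_congr ?_ rfl rfl
    simp only [List.any_eq_true, List.mem_range, decide_eq_true_eq]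
    constructor
    · rintro ⟨j0, hj0, hb, hik, hjj⟩; subst hjj; exact ⟨hik, hj0, hb⟩
    · rintro ⟨hik, hj, hb⟩; exact ⟨j, hj, hb, hik, rfl⟩
  rw [pvCell_foldl_range _
    (fun k i j => decide (i = k ∧ j < c ∧ (k = 0 ∨ j = 0 ∨ k = n - 1 ∨ j = c - 1)))
    hstep n m0 i j]
  have heq : ((List.range n).any fun k =>
      decide (i = k ∧ j < c ∧ (k = 0 ∨ j = 0 ∨ k = n - 1 ∨ j = c - 1))) =
      decide (i < n ∧ j < c ∧ (i = 0 ∨ j = 0 ∨ i = n - 1 ∨ j = c - 1)) := by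
    refine Bool.eq_iff_iff.mpr ?_
    simp only [List.any_eq_true, List.mem_range, decide_eq_true_eq]
    constructor
    · rintro ⟨k, hk, hik, h⟩; subst hik; exact ⟨hk, h⟩
    · rintro ⟨hk, h⟩; exact ⟨i, hk, rfl, h⟩
  rw [heq]
  by_cases h : i < n ∧ j < c ∧ (i = 0 ∨ j = 0 ∨ i = n - 1 ∨ j = c - 1) <;> simp [h]

theorem pvCellB1 (n c : Nat) (m0 : List (List String)) (i j : Nat) :
    pvCell ((List.range c).foldl (fun m j => pvUpd (pvUpd m 0 j) (n - 1) j) m0) i j =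
    if (i = 0 ∨ i = n - 1) ∧ j < c then (pvCell m0 i j).map (fun _ => "#") else pvCell m0 i j := by
  rw [pvCell_foldl_range _
    (fun j0 i j => decide ((i = 0 ∨ i = n - 1) ∧ j = j0))
    (by
      intro m j0 i j
      rw [pvCell_upd2col]
      by_cases h : (i = 0 ∨ i = n - 1) ∧ j = j0 <;> simp [h]) c m0 i j]
  have heq : ((List.range c).any fun j0 => decide ((i = 0 ∨ i = n - 1) ∧ j = j0)) =
      decide ((i = 0 ∨ i = n - 1) ∧ j < c) := by
    refine Bool.eq_iff_iff.mpr ?_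
    simp only [List.any_eq_true, List.mem_range, decide_eq_true_eq]
    constructor
    · rintro ⟨j0, hj0, hb, hjj⟩; subst hjj; exact ⟨hb, hj0⟩
    · rintro ⟨hb, hj⟩; exact ⟨j, hj, hb, rfl⟩
  rw [heq]
  by_cases h : (i = 0 ∨ i = n - 1) ∧ j < c <;> simp [h]

theorem pvCellB2 (n c : Nat) (m1 : List (List String)) (i j : Nat) :
    pvCell ((List.range n).foldl (fun m i => pvUpd (pvUpd m i 0) i (c - 1)) m1) i j =
    if i < n ∧ (j = 0 ∨ j = c - 1) then (pvCell m1 i j).map (fun _ => "#") else pvCell m1 i j := by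
  rw [pvCell_foldl_range _
    (fun i0 i j => decide (i = i0 ∧ (j = 0 ∨ j = c - 1)))
    (by
      intro m i0 i j
      rw [pvCell_upd2row]
      by_cases h : i = i0 ∧ (j = 0 ∨ j = c - 1) <;> simp [h]) n m1 i j]
  have heq : ((List.range n).any fun i0 => decide (i = i0 ∧ (j = 0 ∨ j = c - 1))) =
      decide (i < n ∧ (j = 0 ∨ j = c - 1)) := by
    refine Bool.eq_iff_iff.mpr ?_
    simp only [List.any_eq_true, List.mem_range, decide_eq_true_eq]
    constructor
    · rintro ⟨i0, hi0, hii, hb⟩; subst hii; exact ⟨hi0, hb⟩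
    · rintro ⟨hi, hb⟩; exact ⟨i, hi, rfl, hb⟩
  rw [heq]
  by_cases h : i < n ∧ (j = 0 ∨ j = c - 1) <;> simp [h]

-- ===== VERDICT (by name: the statement is the Claim_ definition above) =====
theorem convertir_mapa_a_matriz_spec : Claim_equal_convertir_mapa_a_matriz := by
  intro mapa _ _
  unfold Spec_convertir_mapa_a_matriz
  simp only [convertir_mapa_a_matriz, convertir_mapa_a_matriz_alt]
  rw [pvFoldl_append_eq_map]
  apply pvEq_of_shape_cell
  · -- the row lengths agree: every assignment preserves them
    rw [pvShapeA]
    split_ifs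
    · rfl
    · rw [pvShape_foldl _ (fun m x => by rw [pvShape_upd, pvShape_upd]),
        pvShape_foldl _ (fun m x => by rw [pvShape_upd, pvShape_upd])]
  · -- the cells agree
    intro i j
    rw [pvCellA]
    by_cases hc : (((PySem.Str.split? mapa "\n").getD []).headI).toList.length = 0
    · rw [if_pos hc, hc]
      simp
    · rw [if_neg hc, pvCellB2, pvCellB1]
      rcases hX : pvCell (((PySem.Str.split? mapa "\n").getD []).map
          (fun f => f.toList.map (fun ch => String.ofList [ch]))) i j with _ | x
      · split_ifs <;> simp [hX]
      · have hin : i < (((PySem.Str.split? mapa "\n").getD []).map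
            (fun f => f.toList.map (fun ch => String.ofList [ch]))).length := by
          by_contra h
          have hnone : (((PySem.Str.split? mapa "\n").getD []).map
              (fun f => f.toList.map (fun ch => String.ofList [ch])))[i]? = none :=
            List.getElem?_eq_none_iff.mpr (by omega)
          simp [pvCell, hnone] at hX
        have hcpos : 0 < (((PySem.Str.split? mapa "\n").getD []).headI).toList.length :=
          Nat.pos_of_ne_zero hc
        split_ifs <;> simp_all <;> omega
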